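-- pv_equiv track=rewrite | github.com/Pililink/ComfyUI-Pililink-LatentSyncWrapper | latentsync_refactor_runtime.py | _build_clip_batch_candidates
-- ===== SOURCE A (Python) =====
-- def _build_clip_batch_candidates(requested_batch_size, auto_oom_fallback):
--     requested_batch_size = max(1, int(requested_batch_size))
--     if not auto_oom_fallback or requested_batch_size == 1:
--         return [requested_batch_size]
--
--     candidates = [requested_batch_size]
--     current = requested_batch_size
--     while current > 1:
--         current = max(1, current // 2)
--         if current not in candidates:
--             candidates.append(current)
--     return candidates
-- ===== SOURCE B (Python) =====
-- def _build_clip_batch_candidates(requested_batch_size, auto_oom_fallback):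
--     requested_batch_size = max(1, int(requested_batch_size))
--     if not auto_oom_fallback:
--         return [requested_batch_size]
--     # Horner pass over the binary digits: each prefix of the bit string is one
--     # candidate (smallest first), so reverse at the end.
--     out = []
--     acc = 0
--     for bit in format(requested_batch_size, 'b'):
--         acc = 2 * acc + (1 if bit == '1' else 0)
--         out.append(acc)
--     out.reverse()
--     return out
-- ===== Notes on version B (the rewrite author's own statement) =====
-- stated objective: alternative
-- what changed: Instead of A's halve-until-1 loop with a membership dedup, B makes a single Horner pass over the binary digit string of the requested size, collecting each bit-prefix value as a candidate (ascending) and reversing at the end.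
import Mathlib
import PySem

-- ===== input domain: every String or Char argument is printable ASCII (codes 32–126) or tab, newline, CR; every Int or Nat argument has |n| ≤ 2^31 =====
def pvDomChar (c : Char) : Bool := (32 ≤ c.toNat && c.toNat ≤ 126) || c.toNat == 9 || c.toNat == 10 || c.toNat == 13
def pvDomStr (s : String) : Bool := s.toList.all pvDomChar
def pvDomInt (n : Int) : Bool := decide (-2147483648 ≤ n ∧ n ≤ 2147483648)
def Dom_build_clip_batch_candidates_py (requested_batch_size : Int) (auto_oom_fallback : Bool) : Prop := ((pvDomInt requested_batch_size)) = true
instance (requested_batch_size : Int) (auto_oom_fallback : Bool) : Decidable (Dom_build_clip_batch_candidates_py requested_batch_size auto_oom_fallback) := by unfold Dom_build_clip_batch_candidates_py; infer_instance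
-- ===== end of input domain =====

-- B replaces A's halve-until-1 loop with membership dedup by a single Horner pass over the binary digits, collecting bit-prefix values and reversing (alternative decomposition).

-- ===== PORT A =====
-- A's while loop; (candidates, current) is the loop state
def pvALoop (candidates : List Int) (current : Int) : List Int :=
  if _h : current > 1 then
    let c := max 1 (PySem.Int.floordiv current 2)
    let candidates' := if candidates.contains c then candidates else candidates ++ [c]
    pvALoop candidates' c
  else candidates
termination_by current.toNat
decreasing_by
  simp only [PySem.Int.floordiv_eq_ediv_of_pos (by omega : (0:Int) < 2)]
  omega

def build_clip_batch_candidates_py (requested_batch_size : Int) (auto_oom_fallback : Bool) : List Int :=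
  let rb := max 1 requested_batch_size
  if !auto_oom_fallback || rb == 1 then [rb]
  else pvALoop [rb] rb

-- ===== PORT B =====
-- format(n, 'b'): the binary digits of n, most significant first (n ≥ 1)
def pvBits (n : Nat) : List Nat :=
  if n < 2 then [n] else pvBits (n / 2) ++ [n % 2]
decreasing_by omega

def build_clip_batch_candidates_py_alt (requested_batch_size : Int) (auto_oom_fallback : Bool) : List Int :=
  let rb := max 1 requested_batch_size
  if !auto_oom_fallback then [rb]
  else
    -- for bit in format(rb,'b'): acc = 2*acc + bit; out.append(acc); then out.reverse()
    let st := (pvBits rb.toNat).foldl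
      (fun (s : List Int × Int) (b : Nat) =>
        let acc := 2 * s.2 + (if b = 1 then (1 : Int) else 0)
        (s.1 ++ [acc], acc)) ([], 0)
    st.1.reverse

-- ===== PRECONDITION & SPEC =====
def Spec_build_clip_batch_candidates_py (requested_batch_size : Int) (auto_oom_fallback : Bool) (out : List Int) : Prop := out = build_clip_batch_candidates_py_alt requested_batch_size auto_oom_fallback
instance (requested_batch_size : Int) (auto_oom_fallback : Bool) (out : List Int) : Decidable (Spec_build_clip_batch_candidates_py requested_batch_size auto_oom_fallback out) := by unfold Spec_build_clip_batch_candidates_py; infer_instance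

-- ===== CLAIM (what is proved, stated in full; the proofs are below) =====
def Claim_equal_build_clip_batch_candidates_py : Prop := ∀ (requested_batch_size : Int) (auto_oom_fallback : Bool), Dom_build_clip_batch_candidates_py requested_batch_size auto_oom_fallback → Spec_build_clip_batch_candidates_py requested_batch_size auto_oom_fallback (build_clip_batch_candidates_py requested_batch_size auto_oom_fallback)

-- ===== LEMMAS AND PROOFS =====
-- the common halving chain below n: [n/2, n/4, ..., 1] (empty for n ≤ 1)
def pvTailChain (n : Nat) : List Nat :=
  if _h : n ≤ 1 then [] else (n / 2) :: pvTailChain (n / 2)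
decreasing_by omega

lemma pvALoop_chain (n : Nat) (acc : List Int) (h1 : 1 ≤ n)
    (hinv : ∀ x ∈ acc, (n : Int) ≤ x) :
    pvALoop acc (n : Nat) = acc ++ (pvTailChain n).map Int.ofNat := by
  induction n using Nat.strong_induction_on generalizing acc with
  | _ n ih =>
    rw [pvALoop.eq_def, pvTailChain]
    by_cases h2 : n ≤ 1
    · have : ¬ ((n : Int) > 1) := by omega
      simp [this, h2]
    · have hgt : ((n : Int) > 1) := by omega
      have hfd : PySem.Int.floordiv (n : Int) 2 = ((n / 2 : Nat) : Int) := by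
        rw [PySem.Int.floordiv_eq_ediv_of_pos (by omega : (0:Int) < 2)]; omega
      have hmax : max 1 ((n / 2 : Nat) : Int) = ((n / 2 : Nat) : Int) := by omega
      have hnotmem : acc.contains ((n / 2 : Nat) : Int) = false := by
        simp only [List.contains_eq_mem, decide_eq_false_iff_not]
        intro hmem
        have := hinv _ hmem
        omega
      simp only [hgt, dite_true, hfd, hmax, hnotmem, Bool.false_eq_true, if_false,
        h2, dite_false]
      rw [ih (n / 2) (by omega) (acc ++ [((n / 2 : Nat) : Int)]) (by omega)
        (by intro x hx
            rcases List.mem_append.mp hx with hx | hx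
            · have := hinv _ hx; omega
            · simp at hx; omega)]
      simp

-- B's Horner fold over the bits of n produces the ascending prefix list and final accumulator n
lemma pvBFold (n : Nat) (h1 : 1 ≤ n) (l : List Int) :
    (pvBits n).foldl
      (fun (s : List Int × Int) (b : Nat) =>
        let acc := 2 * s.2 + (if b = 1 then (1 : Int) else 0)
        (s.1 ++ [acc], acc)) (l, 0)
      = (l ++ (((n : Int)) :: (pvTailChain n).map Int.ofNat).reverse, (n : Int)) := by
  induction n using Nat.strong_induction_on generalizing l with
  | _ n ih =>
    rw [pvBits, pvTailChain]
    by_cases h2 : n < 2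
    · have : n = 1 := by omega
      subst this
      simp
    · have hle : ¬ n ≤ 1 := by omega
      have h12 : 1 ≤ n / 2 := by omega
      rw [if_neg h2, List.foldl_append, ih (n / 2) (by omega) h12 l]
      simp only [List.foldl_cons, List.foldl_nil]
      have hacc2 : (2 * ((n : Int) / 2) + if n % 2 = 1 then (1 : Int) else 0) = (n : Int) := by
        by_cases hp : n % 2 = 1 <;> simp [hp] <;> omega
      simp [hle, List.append_assoc, hacc2]

-- ===== VERDICT (by name: the statement is the Claim_ definition above) =====
theorem build_clip_batch_candidates_py_spec : Claim_equal_build_clip_batch_candidates_py := by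
  intro r auto _
  unfold Spec_build_clip_batch_candidates_py build_clip_batch_candidates_py build_clip_batch_candidates_py_alt
  cases auto with
  | false => simp
  | true =>
    simp only [Bool.not_true, Bool.false_or, Bool.false_eq_true, if_false]
    obtain ⟨n, hn⟩ : ∃ n : Nat, max 1 r = (n : Int) := ⟨(max 1 r).toNat, by omega⟩
    have hn1 : 1 ≤ n := by omega
    simp only [hn, Int.toNat_natCast]
    rw [pvBFold n hn1 []]
    by_cases h1 : n = 1
    · subst h1
      simp [pvTailChain]
    · have hbeq : (((n : Int)) == 1) = false := by
        simp; omega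
      rw [hbeq]
      simp only [Bool.false_eq_true, if_false]
      rw [pvALoop_chain n [(n : Int)] hn1 (by simp)]
      simp
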